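-- pv_equiv track=rewrite | github.com/yomilimi/Data-structure | Graph/Graph.py | path_exist
-- ===== SOURCE A (Python) =====
-- def path_exist(g, v1, v2):
--     if v2 in g[v1]:
--         return 1
--     else:
--         for i in g:
--             if v1 in g[i]:
--                 if v2 in g[i]:
--                     return 1
--     return 0
-- ===== SOURCE B (Python) =====
-- def path_exist(g, v1, v2):
--     if v2 in g[v1]:
--         return 1
--     preds = {}
--     for node in g:
--         for w in g[node]:
--             preds.setdefault(w, set()).add(node)
--     return 1 if preds.get(v1, set()) & preds.get(v2, set()) else 0
-- ===== Notes on version B (the rewrite author's own statement) =====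
-- stated objective: alternative
-- what changed: Instead of scanning the vertices and testing both memberships per vertex, B builds an inverted index (a dict mapping each vertex to the set of its in-neighbors) in one pass over all edges, then answers by intersecting the in-neighbor sets of v1 and v2.
import Mathlib
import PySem

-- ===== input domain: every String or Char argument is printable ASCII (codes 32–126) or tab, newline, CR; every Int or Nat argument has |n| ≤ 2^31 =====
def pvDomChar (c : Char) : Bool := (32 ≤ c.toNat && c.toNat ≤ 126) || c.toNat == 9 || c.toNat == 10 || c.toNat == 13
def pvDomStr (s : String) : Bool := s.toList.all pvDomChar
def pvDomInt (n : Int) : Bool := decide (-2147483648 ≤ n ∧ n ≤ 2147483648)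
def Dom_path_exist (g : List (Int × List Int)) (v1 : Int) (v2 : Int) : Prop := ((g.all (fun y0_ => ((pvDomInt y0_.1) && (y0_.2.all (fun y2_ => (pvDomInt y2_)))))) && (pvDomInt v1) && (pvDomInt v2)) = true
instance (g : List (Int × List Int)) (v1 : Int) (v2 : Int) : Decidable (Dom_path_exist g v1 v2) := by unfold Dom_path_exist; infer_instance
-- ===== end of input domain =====

-- B replaces A's vertex scan by building an inverted index (vertex → set of in-neighbors)
-- over all edges, then intersecting the in-neighbor sets of v1 and v2.

-- ===== PORT A =====
-- for i in g: if v1 in g[i]: if v2 in g[i]: return 1   — structural recursion over the key list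
def pathLoopA (g : PySem.Dict Int (List Int)) (v1 v2 : Int) : List Int → Int
  | [] => 0
  | i :: rest =>
    if v1 ∈ g.getD i [] then
      if v2 ∈ g.getD i [] then 1 else pathLoopA g v1 v2 rest
    else pathLoopA g v1 v2 rest

def path_exist (g : List (Int × List Int)) (v1 : Int) (v2 : Int) : Int :=
  if v2 ∈ (PySem.Dict.mk g).getD v1 [] then 1
  else pathLoopA (PySem.Dict.mk g) v1 v2 (PySem.Dict.mk g).keys

-- ===== PORT B =====
-- preds.setdefault(w, set()).add(node)  ==  preds[w] = preds.get(w, set()) ∪ {node}  ==  modify w [] (·.add node)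
def buildPreds (G : PySem.Dict Int (List Int)) (ks : List Int) : PySem.Dict Int (PySem.Set Int) :=
  ks.foldl (fun d node =>
    (G.getD node []).foldl (fun d w => d.modify w [] (fun s => PySem.Set.add s node)) d)
    PySem.Dict.empty

def path_exist_alt (g : List (Int × List Int)) (v1 : Int) (v2 : Int) : Int :=
  if v2 ∈ (PySem.Dict.mk g).getD v1 [] then 1
  else
    let preds := buildPreds (PySem.Dict.mk g) (PySem.Dict.mk g).keys
    if PySem.Set.inter (preds.getD v1 []) (preds.getD v2 []) ≠ [] then 1 else 0

-- ===== PRECONDITION & SPEC =====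
-- Pre_ excludes exactly the inputs where Python A raises KeyError: v1 not a key of g.
def Pre_path_exist (g : List (Int × List Int)) (v1 : Int) (v2 : Int) : Prop :=
  v1 ∈ g.map Prod.fst
instance (g : List (Int × List Int)) (v1 : Int) (v2 : Int) : Decidable (Pre_path_exist g v1 v2) := by
  unfold Pre_path_exist; infer_instance
def pvWitness_path_exist : (List (Int × List Int)) × Int × Int := ([(0, [1]), (2, [0, 1])], 0, 1)

def Spec_path_exist (g : List (Int × List Int)) (v1 : Int) (v2 : Int) (out : Int) : Prop := out = path_exist_alt g v1 v2
instance (g : List (Int × List Int)) (v1 : Int) (v2 : Int) (out : Int) : Decidable (Spec_path_exist g v1 v2 out) := by unfold Spec_path_exist; infer_instance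

-- ===== CLAIM (what is proved, stated in full; the proofs are below) =====
def Claim_equal_path_exist : Prop := ∀ (g : List (Int × List Int)) (v1 : Int) (v2 : Int), Dom_path_exist g v1 v2 → Pre_path_exist g v1 v2 → Spec_path_exist g v1 v2 (path_exist g v1 v2)

-- ===== LEMMAS AND PROOFS =====
lemma pathLoopA_eq_exists (g : PySem.Dict Int (List Int)) (v1 v2 : Int) (l : List Int) :
    pathLoopA g v1 v2 l =
      if ∃ i ∈ l, v1 ∈ g.getD i [] ∧ v2 ∈ g.getD i [] then 1 else 0 := by
  induction l with
  | nil => simp [pathLoopA]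
  | cons i rest ih =>
    simp only [pathLoopA, ih]
    by_cases h1 : v1 ∈ g.getD i [] <;> by_cases h2 : v2 ∈ g.getD i [] <;>
      simp [h1, h2]

lemma mem_inner_fold (i : Int) (ns : List Int) (d : PySem.Dict Int (PySem.Set Int)) (w x : Int) :
    x ∈ (ns.foldl (fun d n => d.modify n [] (fun s => PySem.Set.add s i)) d).getD w [] ↔
      x ∈ d.getD w [] ∨ (x = i ∧ w ∈ ns) := by
  induction ns generalizing d with
  | nil => simp
  | cons n ns ih =>
    simp only [List.foldl_cons, ih, PySem.Dict.getD_modify, List.mem_cons]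
    by_cases hw : w = n <;> simp [hw, PySem.Set.mem_add] <;> tauto

lemma mem_buildPreds_fold (G : PySem.Dict Int (List Int)) (ks : List Int)
    (d : PySem.Dict Int (PySem.Set Int)) (w x : Int) :
    x ∈ (ks.foldl (fun d node =>
        (G.getD node []).foldl (fun d w => d.modify w [] (fun s => PySem.Set.add s node)) d) d).getD w [] ↔
      x ∈ d.getD w [] ∨ ∃ i ∈ ks, x = i ∧ w ∈ G.getD i [] := by
  induction ks generalizing d with
  | nil => simp
  | cons k ks ih =>
    simp only [List.foldl_cons, ih, mem_inner_fold, List.mem_cons]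
    constructor
    · rintro (((h | h) | ⟨i, hi, h⟩))
      · exact Or.inl h
      · exact Or.inr ⟨k, Or.inl rfl, h⟩
      · exact Or.inr ⟨i, Or.inr hi, h⟩
    · rintro (h | ⟨i, (rfl | hi), h⟩)
      · exact Or.inl (Or.inl h)
      · exact Or.inl (Or.inr h)
      · exact Or.inr ⟨i, hi, h⟩

lemma mem_buildPreds (G : PySem.Dict Int (List Int)) (ks : List Int) (w x : Int) :
    x ∈ (buildPreds G ks).getD w [] ↔ ∃ i ∈ ks, x = i ∧ w ∈ G.getD i [] := by
  unfold buildPreds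
  rw [mem_buildPreds_fold]
  simp [PySem.Dict.getD_empty]

lemma inter_preds_ne_nil_iff (G : PySem.Dict Int (List Int)) (v1 v2 : Int) :
    PySem.Set.inter ((buildPreds G G.keys).getD v1 []) ((buildPreds G G.keys).getD v2 []) ≠ [] ↔
      ∃ i ∈ G.keys, v1 ∈ G.getD i [] ∧ v2 ∈ G.getD i [] := by
  rw [← List.isEmpty_eq_false_iff, List.isEmpty_eq_false_iff_exists_mem]
  constructor
  · rintro ⟨x, hx⟩
    rcases (PySem.Set.mem_inter _ _ _).1 hx with ⟨h1, h2⟩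
    rcases (mem_buildPreds _ _ _ _).1 h1 with ⟨i, hik, hxi, hv1⟩
    rcases (mem_buildPreds _ _ _ _).1 h2 with ⟨j, _, hxj, hv2⟩
    have hij : i = j := by omega
    exact ⟨i, hik, hv1, by rw [hij]; exact hv2⟩
  · rintro ⟨i, hik, h1, h2⟩
    exact ⟨i, (PySem.Set.mem_inter _ _ _).2
      ⟨(mem_buildPreds _ _ _ _).2 ⟨i, hik, rfl, h1⟩,
       (mem_buildPreds _ _ _ _).2 ⟨i, hik, rfl, h2⟩⟩⟩

-- ===== VERDICT (by name: the statement is the Claim_ definition above) =====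
theorem path_exist_spec : Claim_equal_path_exist := by
  intro g v1 v2 _ _
  unfold Spec_path_exist path_exist path_exist_alt
  by_cases h : v2 ∈ (PySem.Dict.mk g).getD v1 []
  · simp [h]
  · simp only [h, if_false]
    rw [pathLoopA_eq_exists]
    split_ifs with he hne hne
    · rfl
    · exact absurd ((inter_preds_ne_nil_iff _ _ _).2 he) hne
    · exact absurd ((inter_preds_ne_nil_iff _ _ _).1 hne) he
    · rfl
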